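-- pv_equiv track=rewrite | github.com/wisdomoflovingfaith/lupopedia | scripts/rebuild_lupo_contents.py | extract_title_and_description
-- ===== SOURCE A (Python) =====
-- def extract_title_and_description(text: str, fallback_title: str):
--     lines = text.splitlines()
--     title = None
--     title_idx = None
--
--     for i, line in enumerate(lines):
--         if line.startswith("# "):
--             title = line[2:].strip()
--             title_idx = i
--             break
--
--     if not title:
--         title = fallback_title
--
--     desc_lines = []
--     i = 0 if title_idx is None else title_idx + 1
--
--     while i < len(lines) and lines[i].strip() == "":
--         i += 1
--
--     if i < len(lines) and lines[i].lstrip().startswith("#"):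
--         return title, ""
--
--     while i < len(lines) and lines[i].strip() != "":
--         desc_lines.append(lines[i].strip())
--         i += 1
--
--     description = " ".join(desc_lines).strip()
--     return title, description
-- ===== SOURCE B (Python) =====
-- def extract_title_and_description(text: str, fallback_title: str):
--     lines = text.splitlines()
--     for idx, line in enumerate(lines):
--         if line.startswith("# "):
--             title = line[2:].strip() or fallback_title
--             rest = lines[idx + 1:]
--             break
--     else:
--         title = fallback_title
--         rest = lines
--     # partition the remaining lines into paragraph blocks (maximal runs of non-blank lines)
--     blocks = []
--     cur = []
--     for line in rest:
--         if line.strip():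
--             cur.append(line)
--         elif cur:
--             blocks.append(cur)
--             cur = []
--     if cur:
--         blocks.append(cur)
--     if not blocks or blocks[0][0].lstrip().startswith("#"):
--         return title, ""
--     return title, " ".join(l.strip() for l in blocks[0])
-- ===== Notes on version B (the rewrite author's own statement) =====
-- stated objective: alternative
-- what changed: Replaces A's index-based skip-blanks/collect-run while-loops with a for-else title search that slices off the tail and a single-pass partition of the remaining lines into paragraph blocks, from which the first block is selected and joined.
import Mathlib
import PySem

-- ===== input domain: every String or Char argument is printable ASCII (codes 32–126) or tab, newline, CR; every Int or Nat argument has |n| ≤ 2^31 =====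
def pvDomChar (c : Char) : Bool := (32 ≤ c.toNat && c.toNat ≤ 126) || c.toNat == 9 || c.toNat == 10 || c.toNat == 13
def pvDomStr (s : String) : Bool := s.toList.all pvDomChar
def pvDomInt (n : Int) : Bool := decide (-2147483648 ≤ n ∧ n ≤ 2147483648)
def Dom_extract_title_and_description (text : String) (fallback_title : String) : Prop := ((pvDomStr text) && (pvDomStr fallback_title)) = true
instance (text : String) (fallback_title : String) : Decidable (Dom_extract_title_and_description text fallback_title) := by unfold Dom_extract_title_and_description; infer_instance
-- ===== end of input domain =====

-- B replaces A's index-based skip/collect while-loops by a partition of the tail into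
-- paragraph blocks, selecting the first block (alternative decomposition, same cost).

-- ===== PORT A =====
-- `for i, line in enumerate(lines): if line.startswith("# "): title=line[2:].strip(); title_idx=i; break`
def pvA_find : List String → Nat → Option (Nat × String)
  | [], _ => none
  | l :: ls, i =>
    if PySem.Str.startswith l "# " then some (i, PySem.Str.strip (PySem.Str.slice l (some 2) none))
    else pvA_find ls (i + 1)

-- `while i < len(lines) and lines[i].strip() == "": i += 1` (position kept as the suffix)
def pvA_skip : List String → List String
  | [] => []
  | l :: ls => if PySem.Str.strip l = "" then pvA_skip ls else l :: ls

-- `while i < len(lines) and lines[i].strip() != "": desc_lines.append(lines[i].strip()); i += 1`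
def pvA_collect : List String → List String
  | [] => []
  | l :: ls => if PySem.Str.strip l = "" then [] else PySem.Str.strip l :: pvA_collect ls

def extract_title_and_description (text : String) (fallback_title : String) : String × String :=
  let lines := PySem.Str.splitlines text
  let found := pvA_find lines 0
  let title := match found with
    | some (_, t) => if t = "" then fallback_title else t   -- `if not title: title = fallback_title`
    | none => fallback_title
  let start := match found with
    | some (i, _) => i + 1
    | none => 0
  let rest := pvA_skip (lines.drop start)
  if (match rest with
      | l :: _ => PySem.Str.startswith (PySem.Str.lstrip l) "#"
      | [] => false) then
    (title, "")
  else
    (title, PySem.Str.strip (PySem.Str.join " " (pvA_collect rest)))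

-- ===== PORT B =====
-- `for idx, line in enumerate(lines): if line.startswith("# "): ... rest = lines[idx+1:]; break`
def pvB_find : List String → Option (String × List String)
  | [] => none
  | l :: ls => if PySem.Str.startswith l "# " then some (l, ls) else pvB_find ls

-- loop body: `if line.strip(): cur.append(line) / elif cur: blocks.append(cur); cur = []`
def pvB_step (st : List (List String) × List String) (line : String) : List (List String) × List String :=
  if PySem.Str.strip line ≠ "" then (st.1, st.2 ++ [line])
  else if st.2 ≠ [] then (st.1 ++ [st.2], ([] : List String))
  else st

-- the partition loop plus the trailing `if cur: blocks.append(cur)`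
def pvB_blocks (rest : List String) : List (List String) :=
  let st := rest.foldl pvB_step ([], [])
  if st.2 ≠ [] then st.1 ++ [st.2] else st.1

def extract_title_and_description_alt (text : String) (fallback_title : String) : String × String :=
  let lines := PySem.Str.splitlines text
  let tr := match pvB_find lines with
    | some (l, tl) =>
        (let t := PySem.Str.strip (PySem.Str.slice l (some 2) none)
         ((if t = "" then fallback_title else t), tl))   -- `line[2:].strip() or fallback_title`
    | none => (fallback_title, lines)
  match pvB_blocks tr.2 with
  | [] => (tr.1, "")
  | b :: _ =>
    if PySem.Str.startswith (PySem.Str.lstrip (b.headD "")) "#" then (tr.1, "")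
    else (tr.1, PySem.Str.join " " (b.map PySem.Str.strip))

-- ===== PRECONDITION & SPEC =====
def Spec_extract_title_and_description (text : String) (fallback_title : String) (out : String × String) : Prop := out = extract_title_and_description_alt text fallback_title
instance (text : String) (fallback_title : String) (out : String × String) : Decidable (Spec_extract_title_and_description text fallback_title out) := by unfold Spec_extract_title_and_description; infer_instance

-- ===== CLAIM (what is proved, stated in full; the proofs are below) =====
def Claim_equal_extract_title_and_description : Prop := ∀ (text : String) (fallback_title : String), Dom_extract_title_and_description text fallback_title → Spec_extract_title_and_description text fallback_title (extract_title_and_description text fallback_title)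

-- ===== LEMMAS AND PROOFS =====

-- Boolean "the stripped line is non-blank", used to phrase the loops via takeWhile/dropWhile
def pvP (w : String) : Bool := decide (PySem.Str.strip w ≠ "")

lemma pvA_skip_eq_dropWhile (ls : List String) : pvA_skip ls = ls.dropWhile (fun w => !pvP w) := by
  induction ls with
  | nil => rfl
  | cons l ls ih =>
    simp only [pvA_skip, List.dropWhile_cons]
    by_cases h : PySem.Str.strip l = "" <;> simp [pvP, h, ih]

lemma pvA_collect_eq (ls : List String) : pvA_collect ls = (ls.takeWhile pvP).map PySem.Str.strip := by
  induction ls with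
  | nil => rfl
  | cons l ls ih =>
    simp only [pvA_collect, List.takeWhile_cons]
    by_cases h : PySem.Str.strip l = "" <;> simp [pvP, h, ih]

-- the two title searches agree; B's tail is A's `lines[title_idx+1:]`
lemma pv_find_rel (ls : List String) (i : Nat) :
    (pvB_find ls = none → pvA_find ls i = none) ∧
    (∀ l tl, pvB_find ls = some (l, tl) →
      ∃ j, pvA_find ls i = some (i + j, PySem.Str.strip (PySem.Str.slice l (some 2) none)) ∧
        ls.drop (j + 1) = tl) := by
  induction ls generalizing i with
  | nil => simp [pvA_find, pvB_find]
  | cons x xs ih =>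
    simp only [pvA_find, pvB_find]
    by_cases h : PySem.Str.startswith x "# " = true
    · rw [if_pos h, if_pos h]
      refine ⟨?_, ?_⟩
      · intro hB
        exact absurd hB (by simp)
      intro l tl hB
      obtain ⟨rfl, rfl⟩ : x = l ∧ xs = tl := by simpa using hB
      exact ⟨0, by simp, by simp⟩
    · rw [if_neg h, if_neg h]
      refine ⟨(ih (i + 1)).1, ?_⟩
      intro l tl hB
      obtain ⟨j, hA, hd⟩ := (ih (i + 1)).2 l tl hB
      have hij : i + 1 + j = i + (j + 1) := by omega
      exact ⟨j + 1, by rw [hA, hij], by simpa using hd⟩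

-- foldl invariant: already-closed blocks pass through
lemma pvB_foldl_inv (rest : List String) (blocks : List (List String)) (cur : List String) :
    rest.foldl pvB_step (blocks, cur) =
      (blocks ++ (rest.foldl pvB_step ([], cur)).1, (rest.foldl pvB_step ([], cur)).2) := by
  induction rest generalizing blocks cur with
  | nil => simp
  | cons x xs ih =>
    simp only [List.foldl_cons]
    rw [ih, ih (pvB_step ([], cur) x).1 (pvB_step ([], cur) x).2]
    unfold pvB_step
    by_cases h1 : PySem.Str.strip x ≠ "" <;> by_cases h2 : cur ≠ [] <;>
      simp [h1, h2]

def pvFin (st : List (List String) × List String) : List (List String) :=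
  if st.2 ≠ [] then st.1 ++ [st.2] else st.1

lemma pvB_run (rest : List String) (cur : List String) (h : cur ≠ []) :
    ∃ bs, pvFin (rest.foldl pvB_step ([], cur)) = (cur ++ rest.takeWhile pvP) :: bs := by
  induction rest generalizing cur with
  | nil => exact ⟨[], by simp [pvFin, h]⟩
  | cons x xs ih =>
    by_cases hx : PySem.Str.strip x ≠ ""
    · obtain ⟨bs, hbs⟩ := ih (cur ++ [x]) (by simp)
      refine ⟨bs, ?_⟩
      simp only [List.foldl_cons, pvB_step, if_pos hx]
      rw [hbs]
      simp [pvP, hx]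
    · refine ⟨pvFin (xs.foldl pvB_step ([], [])), ?_⟩
      simp only [List.foldl_cons, pvB_step, if_neg hx, if_pos h]
      rw [pvB_foldl_inv]
      have hx' : pvP x = false := by simp [pvP] at hx ⊢; exact hx
      simp only [List.takeWhile_cons, hx']
      unfold pvFin
      by_cases h2 : (xs.foldl pvB_step ([], [])).2 ≠ [] <;> simp [h2]

lemma pvB_blocks_spec (rest : List String) :
    (rest.dropWhile (fun w => !pvP w) = [] ∧ pvB_blocks rest = []) ∨
    (∃ bs, pvB_blocks rest =
      ((rest.dropWhile (fun w => !pvP w)).takeWhile pvP) :: bs) := by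
  induction rest with
  | nil => exact Or.inl ⟨rfl, rfl⟩
  | cons x xs ih =>
    by_cases hx : PySem.Str.strip x ≠ ""
    · right
      have hx' : pvP x = true := by simp [pvP]; exact hx
      obtain ⟨bs, hbs⟩ := pvB_run xs [x] (by simp)
      refine ⟨bs, ?_⟩
      unfold pvB_blocks
      simp only [List.foldl_cons, pvB_step, if_pos hx]
      simp only [List.dropWhile_cons, hx', Bool.not_true]
      simpa [pvFin, hx'] using hbs
    · have hx' : pvP x = false := by simp [pvP] at hx ⊢; exact hx
      have hstep : pvB_step ([], []) x = ([], []) := by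
        simp [pvB_step, hx]
      have hblocks : pvB_blocks (x :: xs) = pvB_blocks xs := by
        unfold pvB_blocks
        simp [hstep]
      rw [hblocks]
      simpa [List.dropWhile_cons, hx'] using ih

-- ---- strip is the identity on the joined description ----

lemma pv_head_dropWhile {p : Char → Bool} {l : List Char} {c : Char}
    (h : (l.dropWhile p).head? = some c) : p c = false := by
  induction l with
  | nil => simp at h
  | cons x xs ih =>
    rw [List.dropWhile_cons] at h
    by_cases hx : p x = true
    · rw [if_pos hx] at h
      exact ih h
    · rw [if_neg hx] at h
      simp only [List.head?_cons, Option.some.injEq] at h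
      subst h
      simpa using hx

lemma pv_head_of_prefix {l₁ l₂ : List Char} {c : Char}
    (hp : l₁ <+: l₂) (h : l₁.head? = some c) : l₂.head? = some c := by
  obtain ⟨t, rfl⟩ := hp
  cases l₁ <;> simp_all

lemma pv_strip_head {cs : List Char} {c : Char}
    (h : (PySem.Chars.strip cs).head? = some c) : PySem.Chars.isspace c = false := by
  have hpref : PySem.Chars.strip cs <+: PySem.Chars.lstrip cs := by
    unfold PySem.Chars.strip PySem.Chars.rstrip
    have hs := List.dropWhile_suffix (l := (PySem.Chars.lstrip cs).reverse) PySem.Chars.isspace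
    have := List.reverse_prefix.mpr hs
    simpa using this
  have : (PySem.Chars.lstrip cs).head? = some c := pv_head_of_prefix hpref h
  exact pv_head_dropWhile (p := PySem.Chars.isspace) (l := cs) this

lemma pv_strip_getLast {cs : List Char} {c : Char}
    (h : (PySem.Chars.strip cs).getLast? = some c) : PySem.Chars.isspace c = false := by
  rw [List.getLast?_eq_head?_reverse] at h
  unfold PySem.Chars.strip PySem.Chars.rstrip at h
  rw [List.reverse_reverse] at h
  exact pv_head_dropWhile h

lemma pv_strip_fix {cs : List Char} {c d : Char}
    (hc : cs.head? = some c) (hcs : PySem.Chars.isspace c = false)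
    (hd : cs.getLast? = some d) (hds : PySem.Chars.isspace d = false) :
    PySem.Chars.strip cs = cs := by
  have hl : PySem.Chars.lstrip cs = cs := by
    cases cs with
    | nil => rfl
    | cons a t =>
      simp only [List.head?_cons, Option.some.injEq] at hc
      subst hc
      simp [PySem.Chars.lstrip, hcs]
  unfold PySem.Chars.strip PySem.Chars.rstrip
  rw [hl]
  rw [List.getLast?_eq_head?_reverse] at hd
  cases hrev : cs.reverse with
  | nil =>
    have : cs = [] := by simpa using congrArg List.reverse hrev
    simp [this]
  | cons b t =>
    rw [hrev] at hd
    simp only [List.head?_cons, Option.some.injEq] at hd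
    subst hd
    rw [List.dropWhile_cons, if_neg (by simp [hds])]
    rw [← hrev, List.reverse_reverse]

lemma pv_join_ends (sep : List Char) (ws : List (List Char)) (hne : ws ≠ [])
    (hall : ∀ v ∈ ws, (∃ u, v = PySem.Chars.strip u) ∧ v ≠ []) :
    ∃ c d, (PySem.Chars.join sep ws).head? = some c ∧ PySem.Chars.isspace c = false ∧
      (PySem.Chars.join sep ws).getLast? = some d ∧ PySem.Chars.isspace d = false := by
  induction ws with
  | nil => exact absurd rfl hne
  | cons w parts ih =>
    obtain ⟨⟨u, hu⟩, hwne⟩ := hall w (by simp)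
    obtain ⟨c, hc⟩ : ∃ c, w.head? = some c := by
      cases w with
      | nil => exact absurd rfl hwne
      | cons a t => exact ⟨a, rfl⟩
    obtain ⟨d, hdd⟩ : ∃ d, w.getLast? = some d := by
      cases hgl : w.getLast? with
      | none => exact absurd (List.getLast?_eq_none_iff.mp hgl) hwne
      | some d => exact ⟨d, rfl⟩
    have hcs : PySem.Chars.isspace c = false := pv_strip_head (hu ▸ hc)
    have hds : PySem.Chars.isspace d = false := pv_strip_getLast (hu ▸ hdd)
    cases parts with
    | nil =>
      refine ⟨c, d, ?_, hcs, ?_, hds⟩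
      · rw [PySem.Chars.join_singleton]; exact hc
      · rw [PySem.Chars.join_singleton]; exact hdd
    | cons b rest =>
      obtain ⟨c', d', hc', hcs', hd', hds'⟩ :=
        ih (by simp) (fun v hv => hall v (by simp [hv]))
      refine ⟨c, d', ?_, hcs, ?_, hds'⟩
      · rw [PySem.Chars.join_cons_cons]
        rw [List.append_assoc]
        exact pv_head_of_prefix ⟨sep ++ PySem.Chars.join sep (b :: rest), rfl⟩ hc
      · rw [PySem.Chars.join_cons_cons]
        have hJne : PySem.Chars.join sep (b :: rest) ≠ [] := by
          intro hnil
          rw [hnil] at hd'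
          simp at hd'
        rw [List.getLast?_append_of_ne_nil (w ++ sep) hJne]
        exact hd'

lemma pv_strip_join (ws : List String)
    (h : ∀ w ∈ ws, (∃ v, w = PySem.Str.strip v) ∧ w ≠ "") (hne : ws ≠ []) :
    PySem.Str.strip (PySem.Str.join " " ws) = PySem.Str.join " " ws := by
  have hall : ∀ v ∈ ws.map String.toList, (∃ u, v = PySem.Chars.strip u) ∧ v ≠ [] := by
    intro v hv
    obtain ⟨w, hw, rfl⟩ := List.mem_map.mp hv
    obtain ⟨⟨u, hu⟩, hwne⟩ := h w hw
    exact ⟨⟨u.toList, by rw [hu]; simp⟩, by simpa using hwne⟩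
  obtain ⟨c, d, hc, hcs, hd, hds⟩ :=
    pv_join_ends (" ".toList) (ws.map String.toList) (by simpa using hne) hall
  have hfix := pv_strip_fix hc hcs hd hds
  unfold PySem.Str.strip
  rw [show (PySem.Str.join " " ws).toList = PySem.Chars.join (" ".toList) (ws.map String.toList) from by simp [PySem.Str.join]]
  rw [hfix]
  simp [PySem.Str.join]

-- the description part of both results agrees for any tail of lines
lemma pv_core (title : String) (rest : List String) :
    (if (match pvA_skip rest with
         | l :: _ => PySem.Str.startswith (PySem.Str.lstrip l) "#"
         | [] => false) then
      (title, "")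
     else
      (title, PySem.Str.strip (PySem.Str.join " " (pvA_collect (pvA_skip rest))))) =
    (match pvB_blocks rest with
     | [] => (title, "")
     | b :: _ =>
       if PySem.Str.startswith (PySem.Str.lstrip (b.headD "")) "#" then (title, "")
       else (title, PySem.Str.join " " (b.map PySem.Str.strip))) := by
  rcases pvB_blocks_spec rest with ⟨hd, hb⟩ | ⟨bs, hb⟩
  · rw [hb, pvA_skip_eq_dropWhile, hd]
    rw [if_neg (by simp)]
    exact congrArg (Prod.mk title) (by decide)
  · rw [hb, pvA_skip_eq_dropWhile]
    cases hR : rest.dropWhile (fun w => !pvP w) with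
    | nil =>
      rw [List.takeWhile_nil, if_neg (by simp)]
      exact congrArg (Prod.mk title) (by decide)
    | cons l t =>
      have hpl : pvP l = true := by
        have h1 := List.head?_dropWhile_not (fun w => !pvP w) rest
        rw [hR] at h1
        simpa using h1
      rw [List.takeWhile_cons, if_pos hpl]
      simp only [List.headD_cons]
      by_cases hh : PySem.Str.startswith (PySem.Str.lstrip l) "#" = true
      · rw [if_pos hh, if_pos hh]
      · rw [if_neg hh, if_neg hh]
        rw [pvA_collect_eq (l :: t), List.takeWhile_cons, if_pos hpl]
        refine congrArg (Prod.mk title) ?_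
        apply pv_strip_join
        · intro w hw
          obtain ⟨v, hv, rfl⟩ := List.mem_map.mp hw
          refine ⟨⟨v, rfl⟩, ?_⟩
          have hpv : pvP v = true := by
            rcases List.mem_cons.mp hv with rfl | hv'
            · exact hpl
            · exact List.mem_takeWhile_imp hv'
          simpa [pvP] using hpv
        · simp

-- ===== VERDICT (by name: the statement is the Claim_ definition above) =====
theorem extract_title_and_description_spec : Claim_equal_extract_title_and_description := by
  intro text fallback_title _
  unfold Spec_extract_title_and_description
  unfold extract_title_and_description extract_title_and_description_alt
  cases hB : pvB_find (PySem.Str.splitlines text) with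
  | none =>
    have hA : pvA_find (PySem.Str.splitlines text) 0 = none :=
      (pv_find_rel (PySem.Str.splitlines text) 0).1 hB
    simp only [hA, hB, List.drop_zero]
    exact pv_core fallback_title (PySem.Str.splitlines text)
  | some ltl =>
    obtain ⟨l, tl⟩ := ltl
    obtain ⟨j, hA, hdrop⟩ := (pv_find_rel (PySem.Str.splitlines text) 0).2 l tl hB
    simp only [hA, hB, Nat.zero_add]
    rw [hdrop]
    exact pv_core _ tl
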